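-- pv_equiv track=rewrite | github.com/dhruvjwc24/TJHSST-AI-2023-2024 | Crosswords/b.py | isValidState
-- ===== SOURCE A (Python) =====
-- BLOCKCHAR = "#"
--
-- def isValidState(h, w, state):
--     # for idx, ch in enumerate(state):
--     #     if ch == BLOCKCHAR:
--     #         r, c = getPosFromIdx(idx, h, w)
--     #         for inc in [(0, 1), (1, 0), (0, -1), (-1, 0)]:
--     #             dirChars = []
--     #             currR, currC = r, c
--     #             dr, dc = inc
--     #             while h > (currR:=currR+dr) and w > (currC:=currC+dc) and currR >= 0 and currC >= 0:
--     #                 if state[getIdxFromPos((currR, currC), w)] != BLOCKCHAR: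
--     #                     dirChars.append(state[getIdxFromPos((currR, currC), w)])
--     #                 else:
--     #                     if 0 < len(dirChars) < 3: return False
--     #                     break
--     #             if 0 < len(dirChars) < 3: return False
--     # return True
--     for row in range(h):
--         row = state[row*w:(row+1)*w]
--         rowDivided = row.split(BLOCKCHAR)
--         lens = [0 < len(group) < 3 for group in rowDivided]
--         if any(lens): return False
--     for col in range(w):
--         col = state[col::w]
--         colDivided = col.split(BLOCKCHAR)
--         lens = [0 < len(group) < 3 for group in colDivided]
--         if any(lens): return False
--     return True
-- ===== SOURCE B (Python) =====
-- BLOCKCHAR = "#"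
--
-- def _lineOk(chars):
--     run = 0
--     for ch in chars:
--         if ch == BLOCKCHAR:
--             if 1 <= run <= 2:
--                 return False
--             run = 0
--         else:
--             run += 1
--     return not (1 <= run <= 2)
--
-- def isValidState(h, w, state):
--     n = len(state)
--     for r in range(h):
--         if not _lineOk(state[r*w:(r+1)*w]):
--             return False
--     for c in range(w):
--         if not _lineOk([state[i] for i in range(c, n, w)]):
--             return False
--     return True
-- ===== Notes on version B (the rewrite author's own statement) =====
-- stated objective: alternative
-- what changed: Replaces per-line str.split('#') plus a list comprehension of group-length tests with a single character scan per row/column that maintains a run-length counter (columns gathered by index stepping instead of an extended slice); same traversal cost, different decomposition.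
import Mathlib
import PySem

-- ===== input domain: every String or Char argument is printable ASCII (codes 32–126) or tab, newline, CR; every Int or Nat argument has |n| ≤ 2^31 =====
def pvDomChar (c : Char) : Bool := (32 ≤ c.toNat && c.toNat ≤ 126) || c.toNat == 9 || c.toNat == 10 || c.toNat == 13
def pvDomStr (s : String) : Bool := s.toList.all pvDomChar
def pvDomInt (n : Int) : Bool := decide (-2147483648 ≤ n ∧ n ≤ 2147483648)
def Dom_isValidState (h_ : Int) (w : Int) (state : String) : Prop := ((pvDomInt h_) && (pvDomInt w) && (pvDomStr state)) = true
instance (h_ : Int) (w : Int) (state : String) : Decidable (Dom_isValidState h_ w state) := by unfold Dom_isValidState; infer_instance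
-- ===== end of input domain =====

-- B replaces A's str.split-per-line checking by a single run-length counter scan of each
-- row/column (columns gathered by index stepping instead of an extended slice): an
-- alternative decomposition of the same check, proved to return the same Bool.

-- ===== PORT A =====
-- any([0 < len(group) < 3 for group in divided])
def pvBadGroups (groups : List (List Char)) : Bool :=
  (groups.map (fun g => decide (0 < g.length ∧ g.length < 3))).any id

-- literal port of A: rows via state[row*w:(row+1)*w].split('#'), columns via
-- state[col::w].split('#').  The 'for row in range(h)' loop with its early
-- 'return False' is the counter recursion pvAnyBadRow (range is lazy in Python);
-- same for the column loop.  The '.getD []' after slice? is only reached for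
-- 0 <= c < w, hence w >= 1 > 0 and slice? is 'some' there (step != 0).
def pvAnyBadRow (cs : List Char) (w : Int) (h_ : Int) (r : Int) : Bool :=
  if h : r < h_ then
    pvBadGroups (PySem.Chars.splitOn
      (PySem.List.slice cs (some (r*w)) (some ((r+1)*w))) ['#'])
    || pvAnyBadRow cs w h_ (r+1)
  else false
termination_by (h_ - r).toNat
decreasing_by omega

def pvAnyBadCol (cs : List Char) (w : Int) (c : Int) : Bool :=
  if h : c < w then
    pvBadGroups (PySem.Chars.splitOn
      ((PySem.List.slice? cs (some c) none w).getD []) ['#'])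
    || pvAnyBadCol cs w (c+1)
  else false
termination_by (w - c).toNat
decreasing_by omega

def isValidState (h_ : Int) (w : Int) (state : String) : Bool :=
  let cs := state.toList
  if pvAnyBadRow cs w h_ 0 then false
  else if pvAnyBadCol cs w 0 then false
  else true

-- ===== PORT B =====
-- _lineOk: run-length counter scan; flushes the final run at end of line
def pvLineOk : List Char → Nat → Bool
  | [], run => !(decide (1 ≤ run ∧ run ≤ 2))
  | c :: rest, run =>
    if c = '#' then
      if 1 ≤ run ∧ run ≤ 2 then false else pvLineOk rest 0
    else pvLineOk rest (run + 1)

-- literal port of B: rows via the same slice, columns via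
-- [state[i] for i in range(c, n, w)]; the two 'for ... range' loops with their
-- early 'return False' are the counter recursions pvAllRowsOk / pvAllColsOk.
def pvAllRowsOk (cs : List Char) (w : Int) (h_ : Int) (r : Int) : Bool :=
  if h : r < h_ then
    pvLineOk (PySem.List.slice cs (some (r*w)) (some ((r+1)*w))) 0
    && pvAllRowsOk cs w h_ (r+1)
  else true
termination_by (h_ - r).toNat
decreasing_by omega

def pvAllColsOk (cs : List Char) (n : Int) (w : Int) (c : Int) : Bool :=
  if h : c < w then
    pvLineOk ((PySem.List.pyRange c n w).filterMap (fun i => PySem.List.pyGet? cs i)) 0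
    && pvAllColsOk cs n w (c+1)
  else true
termination_by (w - c).toNat
decreasing_by omega

def isValidState_alt (h_ : Int) (w : Int) (state : String) : Bool :=
  let cs := state.toList
  let n : Int := cs.length
  pvAllRowsOk cs w h_ 0 && pvAllColsOk cs n w 0

-- ===== PRECONDITION & SPEC =====
def Spec_isValidState (h_ : Int) (w : Int) (state : String) (out : Bool) : Prop := out = isValidState_alt h_ w state
instance (h_ : Int) (w : Int) (state : String) (out : Bool) : Decidable (Spec_isValidState h_ w state out) := by unfold Spec_isValidState; infer_instance

-- ===== CLAIM (what is proved, stated in full; the proofs are below) =====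
def Claim_equal_isValidState : Prop := ∀ (h_ : Int) (w : Int) (state : String), Dom_isValidState h_ w state → Spec_isValidState h_ w state (isValidState h_ w state)

-- ===== LEMMAS AND PROOFS =====

-- structural characterisation of split('#') used to relate the two programs
def pvMySplit : List Char → List (List Char)
  | [] => [[]]
  | c :: rest =>
    if c = '#' then [] :: pvMySplit rest
    else
      match pvMySplit rest with
      | g :: gs => (c :: g) :: gs
      | [] => [[c]]

theorem pvMySplit_ne_nil (l : List Char) : pvMySplit l ≠ [] := by
  cases l with
  | nil => simp [pvMySplit]
  | cons c rest =>
    simp only [pvMySplit]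
    split
    · simp
    · cases h : pvMySplit rest <;> simp

theorem pvSplitOn_go_eq (fuel : Nat) (l cur : List Char) (acc : List (List Char))
    (h : l.length < fuel) :
    PySem.Chars.splitOn.go ['#'] fuel l cur acc
      = acc.reverse ++ (pvMySplit l).modifyHead (cur.reverse ++ ·) := by
  induction fuel generalizing l cur acc with
  | zero => omega
  | succ fuel ih =>
    cases l with
    | nil => simp [PySem.Chars.splitOn.go, pvMySplit]
    | cons c rest =>
      by_cases hc : c = '#'
      · subst hc
        have hpre : (['#'] : List Char).isPrefixOf ('#' :: rest) = true := by
          simp [List.isPrefixOf]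
        simp only [PySem.Chars.splitOn.go, hpre, if_pos, List.length_cons, List.length_nil,
          Nat.zero_add, List.drop_succ_cons, List.drop_zero]
        rw [ih rest [] (cur.reverse :: acc) (by simp at h ⊢; omega)]
        cases hs : pvMySplit rest with
        | nil => exact absurd hs (pvMySplit_ne_nil rest)
        | cons g gs => simp [pvMySplit, hs]
      · have hpre : (['#'] : List Char).isPrefixOf (c :: rest) = false := by
          simp only [List.isPrefixOf, Bool.and_eq_false_iff]
          left
          simp only [beq_eq_false_iff_ne, ne_eq]
          exact fun h => hc h.symm
        simp only [PySem.Chars.splitOn.go, hpre]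
        rw [ih rest (c :: cur) acc (by simp at h ⊢; omega)]
        simp only [pvMySplit, hc, ite_false]
        cases hs : pvMySplit rest with
        | nil => exact absurd hs (pvMySplit_ne_nil rest)
        | cons g gs => simp

theorem pvSplitOn_eq (l : List Char) : PySem.Chars.splitOn l ['#'] = pvMySplit l := by
  show PySem.Chars.splitOn.go ['#'] (l.length + 1) l [] [] = _
  rw [pvSplitOn_go_eq (l.length + 1) l [] [] (by omega)]
  cases hs : pvMySplit l with
  | nil => exact absurd hs (pvMySplit_ne_nil l)
  | cons g gs => simp

-- what pvLineOk computes in terms of the split groups, with the pending run length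
def pvBadFrom (run : Nat) : List (List Char) → Bool
  | [] => false
  | g :: gs => decide (0 < run + g.length ∧ run + g.length < 3)
      || (gs.map (fun g => decide (0 < g.length ∧ g.length < 3))).any id

theorem pvLineOk_eq (l : List Char) : ∀ run, pvLineOk l run = !(pvBadFrom run (pvMySplit l)) := by
  induction l with
  | nil =>
    intro run
    show (!(decide (1 ≤ run ∧ run ≤ 2))) = !(pvBadFrom run [[]])
    have hbf : pvBadFrom run [[]] = decide (0 < run ∧ run < 3) := by simp [pvBadFrom]
    rw [hbf, decide_eq_decide.mpr (by omega : (1 ≤ run ∧ run ≤ 2) ↔ (0 < run ∧ run < 3))]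
  | cons c rest ih =>
    intro run
    by_cases hc : c = '#'
    · subst hc
      show (if 1 ≤ run ∧ run ≤ 2 then false else pvLineOk rest 0)
          = !(pvBadFrom run (pvMySplit ('#' :: rest)))
      have hsplit : pvMySplit ('#' :: rest) = [] :: pvMySplit rest := by simp [pvMySplit]
      rw [hsplit]
      cases hs : pvMySplit rest with
      | nil => exact absurd hs (pvMySplit_ne_nil rest)
      | cons g gs =>
        have hbf : pvBadFrom run ([] :: g :: gs)
            = (decide (0 < run ∧ run < 3) || pvBadFrom 0 (g :: gs)) := by
          simp [pvBadFrom]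
        rw [hbf]
        by_cases hr : 1 ≤ run ∧ run ≤ 2
        · rw [if_pos hr, decide_eq_true (by omega : (0 < run ∧ run < 3))]
          simp
        · rw [if_neg hr, ih 0, hs, decide_eq_false (by omega : ¬ (0 < run ∧ run < 3))]
          simp
    · cases hs : pvMySplit rest with
      | nil => exact absurd hs (pvMySplit_ne_nil rest)
      | cons g gs =>
        have hsplit : pvMySplit (c :: rest) = (c :: g) :: gs := by
          simp [pvMySplit, hc, hs]
        have hL : pvLineOk (c :: rest) run = pvLineOk rest (run + 1) := by
          simp [pvLineOk, hc]
        rw [hL, ih (run + 1), hs, hsplit]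
        show (!(pvBadFrom (run + 1) (g :: gs))) = !(pvBadFrom run ((c :: g) :: gs))
        simp only [pvBadFrom, List.length_cons]
        rw [decide_eq_decide.mpr (by omega :
          (0 < run + 1 + g.length ∧ run + 1 + g.length < 3)
            ↔ (0 < run + (g.length + 1) ∧ run + (g.length + 1) < 3))]

theorem pvLineOk_zero (l : List Char) :
    pvLineOk l 0 = !(pvBadGroups (PySem.Chars.splitOn l ['#'])) := by
  rw [pvSplitOn_eq, pvLineOk_eq]
  cases hs : pvMySplit l with
  | nil => exact absurd hs (pvMySplit_ne_nil l)
  | cons g gs => simp [pvBadFrom, pvBadGroups]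

theorem pvPyGet?_of_nonneg (cs : List Char) (i : Int) (h : 0 ≤ i) :
    PySem.List.pyGet? cs i = cs[i.toNat]? := by
  simp only [PySem.List.pyGet?, PySem.List.pyIdx?]
  rw [if_pos h]
  by_cases hl : i < (cs.length : Int)
  · simp [hl]
  · rw [if_neg hl]
    have : cs.length ≤ i.toNat := by omega
    simp [List.getElem?_eq_none this]

theorem pvCol_eq (cs : List Char) (c w : Int) (hc : 0 ≤ c) (hw : 0 < w) :
    (PySem.List.slice? cs (some c) none w).getD []
      = (PySem.List.pyRange c (cs.length : Int) w).filterMap (fun i => PySem.List.pyGet? cs i) := by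
  rw [PySem.List.pyRange_of_pos c (cs.length : Int) hw]
  rw [List.filterMap_map]
  simp only [PySem.List.slice?, PySem.List.sliceIndices]
  rw [if_neg (by omega : ¬ w = 0)]
  have hlt : ¬ w < 0 := by omega
  simp only [hlt, if_false, if_neg (by omega : ¬ c < 0)]
  rw [Option.getD_some]
  by_cases hcn : c < (cs.length : Int)
  · rw [min_eq_left (le_of_lt hcn)]
    rw [if_pos hw, if_pos hcn]
    apply List.filterMap_congr
    intro x _
    have hnn : (0:Int) ≤ c + w * (x:Int) := by
      have := mul_nonneg (le_of_lt hw) (Int.natCast_nonneg x)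
      omega
    simp only [Function.comp]
    rw [pvPyGet?_of_nonneg cs (c + w * (x:Int)) hnn]
  · rw [min_eq_right (le_of_not_gt hcn)]
    rw [if_pos hw, if_neg (lt_irrefl _), if_neg hcn]
    simp

theorem pvAll_eq_not_any (l : List Int) (f g : Int → Bool)
    (h : ∀ x ∈ l, f x = !g x) : l.all f = !l.any g := by
  induction l with
  | nil => simp
  | cons x xs ih =>
    simp only [List.all_cons, List.any_cons, Bool.not_or]
    rw [h x (by simp), ih (fun y hy => h y (by simp [hy]))]

-- the counter recursions compute any/all over the corresponding lazy ranges
theorem pvAnyBadRow_eq (cs : List Char) (w h_ : Int) : ∀ (k : Nat) (r : Int), h_ - r ≤ (k : Int) →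
    pvAnyBadRow cs w h_ r = (PySem.List.pyRange r h_ 1).any (fun r =>
      pvBadGroups (PySem.Chars.splitOn
        (PySem.List.slice cs (some (r*w)) (some ((r+1)*w))) ['#'])) := by
  intro k
  induction k with
  | zero =>
    intro r hk
    rw [pvAnyBadRow, dif_neg (by omega), PySem.List.pyRange_one_eq_nil (by omega)]
    simp
  | succ k ih =>
    intro r hk
    by_cases h : r < h_
    · rw [pvAnyBadRow, dif_pos h, PySem.List.pyRange_one_cons h, List.any_cons,
        ih (r+1) (by omega)]
    · rw [pvAnyBadRow, dif_neg h, PySem.List.pyRange_one_eq_nil (by omega)]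
      simp

theorem pvAnyBadCol_eq (cs : List Char) (w : Int) : ∀ (k : Nat) (c : Int), w - c ≤ (k : Int) →
    pvAnyBadCol cs w c = (PySem.List.pyRange c w 1).any (fun c =>
      pvBadGroups (PySem.Chars.splitOn
        ((PySem.List.slice? cs (some c) none w).getD []) ['#'])) := by
  intro k
  induction k with
  | zero =>
    intro c hk
    rw [pvAnyBadCol, dif_neg (by omega), PySem.List.pyRange_one_eq_nil (by omega)]
    simp
  | succ k ih =>
    intro c hk
    by_cases h : c < w
    · rw [pvAnyBadCol, dif_pos h, PySem.List.pyRange_one_cons h, List.any_cons,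
        ih (c+1) (by omega)]
    · rw [pvAnyBadCol, dif_neg h, PySem.List.pyRange_one_eq_nil (by omega)]
      simp

theorem pvAllRowsOk_eq (cs : List Char) (w h_ : Int) : ∀ (k : Nat) (r : Int), h_ - r ≤ (k : Int) →
    pvAllRowsOk cs w h_ r = (PySem.List.pyRange r h_ 1).all (fun r =>
      pvLineOk (PySem.List.slice cs (some (r*w)) (some ((r+1)*w))) 0) := by
  intro k
  induction k with
  | zero =>
    intro r hk
    rw [pvAllRowsOk, dif_neg (by omega), PySem.List.pyRange_one_eq_nil (by omega)]
    simp
  | succ k ih =>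
    intro r hk
    by_cases h : r < h_
    · rw [pvAllRowsOk, dif_pos h, PySem.List.pyRange_one_cons h, List.all_cons,
        ih (r+1) (by omega)]
    · rw [pvAllRowsOk, dif_neg h, PySem.List.pyRange_one_eq_nil (by omega)]
      simp

theorem pvAllColsOk_eq (cs : List Char) (n w : Int) : ∀ (k : Nat) (c : Int), w - c ≤ (k : Int) →
    pvAllColsOk cs n w c = (PySem.List.pyRange c w 1).all (fun c =>
      pvLineOk ((PySem.List.pyRange c n w).filterMap (fun i => PySem.List.pyGet? cs i)) 0) := by
  intro k
  induction k with
  | zero =>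
    intro c hk
    rw [pvAllColsOk, dif_neg (by omega), PySem.List.pyRange_one_eq_nil (by omega)]
    simp
  | succ k ih =>
    intro c hk
    by_cases h : c < w
    · rw [pvAllColsOk, dif_pos h, PySem.List.pyRange_one_cons h, List.all_cons,
        ih (c+1) (by omega)]
    · rw [pvAllColsOk, dif_neg h, PySem.List.pyRange_one_eq_nil (by omega)]
      simp

-- ===== VERDICT (by name: the statement is the Claim_ definition above) =====
theorem isValidState_spec : Claim_equal_isValidState := by
  intro h_ w state _
  unfold Spec_isValidState isValidState isValidState_alt
  simp only []
  set cs := state.toList with hcs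
  rw [pvAnyBadRow_eq cs w h_ h_.toNat 0 (by omega),
      pvAnyBadCol_eq cs w w.toNat 0 (by omega),
      pvAllRowsOk_eq cs w h_ h_.toNat 0 (by omega),
      pvAllColsOk_eq cs (cs.length : Int) w w.toNat 0 (by omega)]
  have hrows : (PySem.List.pyRange 0 h_ 1).all
      (fun r => pvLineOk (PySem.List.slice cs (some (r*w)) (some ((r+1)*w))) 0)
      = !(PySem.List.pyRange 0 h_ 1).any (fun r =>
          pvBadGroups (PySem.Chars.splitOn (PySem.List.slice cs (some (r*w)) (some ((r+1)*w))) ['#'])) := by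
    apply pvAll_eq_not_any
    intro r _
    exact pvLineOk_zero _
  have hcols : (PySem.List.pyRange 0 w 1).all
      (fun c => pvLineOk ((PySem.List.pyRange c (cs.length : Int) w).filterMap (fun i => PySem.List.pyGet? cs i)) 0)
      = !(PySem.List.pyRange 0 w 1).any (fun c =>
          pvBadGroups (PySem.Chars.splitOn ((PySem.List.slice? cs (some c) none w).getD []) ['#'])) := by
    apply pvAll_eq_not_any
    intro c hcmem
    rw [PySem.List.mem_pyRange_one] at hcmem
    rw [pvLineOk_zero, pvCol_eq cs c w hcmem.1 (by omega)]
  rw [hrows, hcols]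
  cases (PySem.List.pyRange 0 h_ 1).any (fun r =>
      pvBadGroups (PySem.Chars.splitOn (PySem.List.slice cs (some (r*w)) (some ((r+1)*w))) ['#'])) <;>
    cases (PySem.List.pyRange 0 w 1).any (fun c =>
      pvBadGroups (PySem.Chars.splitOn ((PySem.List.slice? cs (some c) none w).getD []) ['#'])) <;> simp
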